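-- pv_equiv track=rewrite | github.com/Shivesh777/First-Year | CSC110/lectures/week05/13-Tom_lecture13.py | multiply_adjacent_repeats
-- ===== SOURCE A (Python) =====
-- def multiply_adjacent_repeats(strings: list[str]) -> int:
--     """Return the product of the numbers of times in each
--     given string that two adjacent characters are equal.
--
--     >>> multiply_adjacent_repeats([
--     ...     'look',      # 1 repeat
--     ...     'Davviid',   # 2 repeats
--     ...     'bbccaaa'])  # 4 repeats
--     8
--     """
--     product_so_far = 1
--
--     for s in strings:
--         repeats_so_far = 0
--
--         # for i in range(1, len(s))
--         for i in range(0, len(s) - 1):  # s = 'look', len(s) = 4, so range(0, 3)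
--             if s[i] == s[i + 1]:
--                 repeats_so_far = repeats_so_far + 1
--
--         repeats = repeats_so_far
--
--         # repeats = count_adjacent_repeats(s)
--         product_so_far = product_so_far * repeats
--
--     return product_so_far
-- ===== SOURCE B (Python) =====
-- def multiply_adjacent_repeats(strings: list[str]) -> int:
--     """Product over strings of (len(s) - number of maximal equal-char runs),
--     using the identity that a run of length L contributes L-1 adjacent repeats."""
--     product = 1
--     for s in strings:
--         runs = 0
--         i = 0
--         n = len(s)
--         while i < n:
--             c = s[i]
--             while i < n and s[i] == c:
--                 i += 1
--             runs += 1
--         product *= n - runs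
--     return product
-- ===== Notes on version B (the rewrite author's own statement) =====
-- stated objective: alternative
-- what changed: B counts repeats per string by run-length grouping (skipping maximal equal-character runs and using len(s) minus number of runs) instead of A's pairwise adjacent-index comparison loop.
import Mathlib
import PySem

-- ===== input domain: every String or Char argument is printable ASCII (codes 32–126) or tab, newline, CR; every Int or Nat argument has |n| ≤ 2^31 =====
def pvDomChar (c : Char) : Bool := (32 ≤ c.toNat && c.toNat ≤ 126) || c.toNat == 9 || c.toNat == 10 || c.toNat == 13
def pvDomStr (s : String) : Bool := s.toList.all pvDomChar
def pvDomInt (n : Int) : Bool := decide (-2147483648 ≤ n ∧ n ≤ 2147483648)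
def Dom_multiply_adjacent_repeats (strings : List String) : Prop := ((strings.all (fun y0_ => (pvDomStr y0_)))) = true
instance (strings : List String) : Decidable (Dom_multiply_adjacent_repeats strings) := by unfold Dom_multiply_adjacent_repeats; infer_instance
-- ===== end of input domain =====

-- B changes the per-string count to run-length grouping (len minus number of runs); same cost, different decomposition.

-- ===== PORT A =====
-- inner loop: for i in range(0, len(s) - 1): if s[i] == s[i + 1]: repeats_so_far += 1
def pvInnerA (l : List Char) : Int :=
  (PySem.List.pyRange 0 ((l.length : Int) - 1) 1).foldl
    (fun acc i => if PySem.List.pyGet? l i == PySem.List.pyGet? l (i + 1) then acc + 1 else acc) 0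

def multiply_adjacent_repeats (strings : List String) : Int :=
  strings.foldl (fun product_so_far s => product_so_far * pvInnerA s.toList) 1

-- ===== PORT B =====
-- B's inner while loop skips one maximal run per outer step; ported as recursion dropping the run.
def pvRuns (l : List Char) : Nat :=
  match l with
  | [] => 0
  | c :: t => 1 + pvRuns (t.dropWhile (· == c))
termination_by l.length
decreasing_by
  have := List.length_dropWhile_le (· == c) t
  simp only [List.length_cons]; omega

def multiply_adjacent_repeats_alt (strings : List String) : Int :=
  strings.foldl (fun product s => product * ((s.toList.length : Int) - pvRuns s.toList)) 1

-- ===== PRECONDITION & SPEC =====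
def Spec_multiply_adjacent_repeats (strings : List String) (out : Int) : Prop := out = multiply_adjacent_repeats_alt strings
instance (strings : List String) (out : Int) : Decidable (Spec_multiply_adjacent_repeats strings out) := by unfold Spec_multiply_adjacent_repeats; infer_instance

-- ===== CLAIM (what is proved, stated in full; the proofs are below) =====
def Claim_equal_multiply_adjacent_repeats : Prop := ∀ (strings : List String), Dom_multiply_adjacent_repeats strings → Spec_multiply_adjacent_repeats strings (multiply_adjacent_repeats strings)

-- ===== LEMMAS AND PROOFS =====

-- number of adjacent equal pairs, as a count over indices
def pvCnt (l : List Char) : Nat :=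
  (List.range (l.length - 1)).countP (fun k => l[k]? == l[k + 1]?)

theorem pvInnerA_eq_cnt (l : List Char) : pvInnerA l = (pvCnt l : Int) := by
  unfold pvInnerA pvCnt
  cases l with
  | nil => simp [PySem.List.pyRange_one_eq_nil]
  | cons a t =>
    rw [show ((a :: t).length : Int) - 1 = ((t.length : Nat) : Int) by simp,
        PySem.List.pyRange_zero_natCast]
    rw [List.foldl_map, PySem.List.foldl_if_add_one]
    simp only [List.length_cons, Nat.add_sub_cancel, zero_add, Int.natCast_inj]
    apply List.countP_congr
    intro k hk
    rw [show ((k : Int) + 1) = ((k + 1 : Nat) : Int) by push_cast; ring,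
        PySem.List.pyGet?_natCast, PySem.List.pyGet?_natCast]

theorem pvCnt_cons (a b : Char) (t : List Char) :
    pvCnt (a :: b :: t) = (if a == b then 1 else 0) + pvCnt (b :: t) := by
  unfold pvCnt
  simp only [List.length_cons, Nat.add_sub_cancel]
  rw [List.range_succ_eq_map, List.countP_cons, List.countP_map]
  simp only [Function.comp_def, List.getElem?_cons_succ, List.getElem?_cons_zero]
  by_cases h : a == b <;> simp [h, Nat.add_comm]

theorem pvRuns_cons_cons (a b : Char) (t : List Char) :
    pvRuns (a :: b :: t) = if a == b then pvRuns (b :: t) else 1 + pvRuns (b :: t) := by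
  by_cases h : a == b
  · have hab : a = b := by simpa using h
    subst hab
    rw [if_pos h]
    conv_lhs => rw [pvRuns]
    conv_rhs => rw [pvRuns]
    simp
  · have hne : ¬ a = b := by simpa using h
    have hb : (b == a) = false := by
      simp only [beq_eq_false_iff_ne, ne_eq]
      exact fun he => hne he.symm
    rw [if_neg h]
    conv_lhs => rw [pvRuns]
    simp [hb]

theorem pvCnt_add_runs (l : List Char) : pvCnt l + pvRuns l = l.length := by
  induction l with
  | nil => simp [pvCnt, pvRuns]
  | cons a t ih =>
    cases t with
    | nil => simp [pvCnt, pvRuns]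
    | cons b t' =>
      rw [pvCnt_cons, pvRuns_cons_cons]
      simp only [List.length_cons] at ih ⊢
      by_cases h : a == b <;> simp [h] <;> omega

theorem pvInner_eq (s : String) :
    pvInnerA s.toList = (s.toList.length : Int) - pvRuns s.toList := by
  rw [pvInnerA_eq_cnt]
  have := pvCnt_add_runs s.toList
  omega

-- ===== VERDICT (by name: the statement is the Claim_ definition above) =====
theorem multiply_adjacent_repeats_spec : Claim_equal_multiply_adjacent_repeats := by
  intro strings _
  unfold Spec_multiply_adjacent_repeats multiply_adjacent_repeats multiply_adjacent_repeats_alt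
  apply PySem.List.foldl_congr_mem
  intro acc s _
  rw [pvInner_eq]
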